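-- pv_equiv track=rewrite | github.com/ZETA-AI-ORG/Zeta_AI | core/hyde_reformulator.py | _extract_last_bot_question
-- ===== SOURCE A (Python) =====
-- def _extract_last_bot_question(history_text: str) -> str:
--     """Extrait la dernière réplique bot de l'historique (Jessica/Assistant/Bot)."""
--     lines = (history_text or "").strip().split("\n")
--     for line in reversed(lines):
--         st = line.strip()
--         if st.startswith(("Jessica:", "Assistant:", "Bot:")):
--             try:
--                 return st.split(":", 1)[1].strip()[:100]
--             except Exception:
--                 return st[:100]
--     return ""
-- ===== SOURCE B (Python) =====
-- def _extract_last_bot_question(history_text: str) -> str: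
--     """Forward pass keeping the most recent matching bot line, then extract once."""
--     last = None
--     for line in (history_text or "").strip().split("\n"):
--         st = line.strip()
--         if st.startswith(("Jessica:", "Assistant:", "Bot:")):
--             last = st
--     if last is None:
--         return ""
--     return last.split(":", 1)[1].strip()[:100]
-- ===== Notes on version B (the rewrite author's own statement) =====
-- stated objective: alternative
-- what changed: Replaces the reverse scan with early exit by a single forward pass that keeps a last-seen accumulator of the most recent matching line, extracting the answer once after the loop.
import Mathlib
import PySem

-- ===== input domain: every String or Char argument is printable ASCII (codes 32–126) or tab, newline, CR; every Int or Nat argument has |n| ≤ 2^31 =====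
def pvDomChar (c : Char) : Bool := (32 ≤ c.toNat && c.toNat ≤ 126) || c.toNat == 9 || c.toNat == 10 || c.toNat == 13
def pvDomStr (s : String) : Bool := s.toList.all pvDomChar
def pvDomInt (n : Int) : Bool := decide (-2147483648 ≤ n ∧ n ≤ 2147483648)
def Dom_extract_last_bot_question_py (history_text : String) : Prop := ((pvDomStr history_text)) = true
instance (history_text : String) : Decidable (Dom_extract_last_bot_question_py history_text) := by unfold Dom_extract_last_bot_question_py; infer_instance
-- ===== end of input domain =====

-- B replaces A's reverse scan with early exit by a forward pass keeping a last-seen accumulator (objective: alternative, same cost).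

-- ===== PORT A =====
-- st.split(":", 1)[1].strip()[:100], with the except branch returning st[:100]
-- (pyGet? = none is exactly Python's IndexError caught by the except)
def pvExtractA (st : String) : String :=
  match (PySem.Str.splitMax? st ":" 1).getD [] |> (PySem.List.pyGet? · 1) with
  | some p => PySem.Str.slice (PySem.Str.strip p) none (some 100)
  | none => PySem.Str.slice st none (some 100)

-- the 'for line in reversed(lines)' loop with its early returns
def pvLoopA : List String → String
  | [] => ""
  | line :: rest =>
    let st := PySem.Str.strip line
    if PySem.Str.startswith st "Jessica:" || PySem.Str.startswith st "Assistant:" ||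
        PySem.Str.startswith st "Bot:" then
      pvExtractA st
    else
      pvLoopA rest

def extract_last_bot_question_py (history_text : String) : String :=
  let src := if history_text = "" then "" else history_text  -- (history_text or "")
  let lines := (PySem.Str.split? (PySem.Str.strip src) "\n").getD []
  pvLoopA lines.reverse

-- ===== PORT B =====
def extract_last_bot_question_py_alt (history_text : String) : String :=
  let src := if history_text = "" then "" else history_text  -- (history_text or "")
  let lines := (PySem.Str.split? (PySem.Str.strip src) "\n").getD []
  let last := lines.foldl (fun acc line =>
    let st := PySem.Str.strip line
    if PySem.Str.startswith st "Jessica:" || PySem.Str.startswith st "Assistant:" ||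
        PySem.Str.startswith st "Bot:" then some st else acc) (none : Option String)
  match last with
  | none => ""
  | some st =>
    -- last.split(":", 1)[1].strip()[:100]; the index-1 access cannot fail here in Python
    match (PySem.Str.splitMax? st ":" 1).getD [] |> (PySem.List.pyGet? · 1) with
    | some p => PySem.Str.slice (PySem.Str.strip p) none (some 100)
    | none => PySem.Str.slice st none (some 100)

-- ===== PRECONDITION & SPEC =====
def Spec_extract_last_bot_question_py (history_text : String) (out : String) : Prop := out = extract_last_bot_question_py_alt history_text
instance (history_text : String) (out : String) : Decidable (Spec_extract_last_bot_question_py history_text out) := by unfold Spec_extract_last_bot_question_py; infer_instance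

-- ===== CLAIM (what is proved, stated in full; the proofs are below) =====
def Claim_equal_extract_last_bot_question_py : Prop := ∀ (history_text : String), Dom_extract_last_bot_question_py history_text → Spec_extract_last_bot_question_py history_text (extract_last_bot_question_py history_text)

-- ===== LEMMAS AND PROOFS =====

-- A's loop with an explicit fallback value for the no-match case
def pvLoopAD : List String → String → String
  | [], d => d
  | line :: rest, d =>
    let st := PySem.Str.strip line
    if PySem.Str.startswith st "Jessica:" || PySem.Str.startswith st "Assistant:" ||
        PySem.Str.startswith st "Bot:" then
      pvExtractA st
    else
      pvLoopAD rest d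

def pvStepB (acc : Option String) (line : String) : Option String :=
  let st := PySem.Str.strip line
  if PySem.Str.startswith st "Jessica:" || PySem.Str.startswith st "Assistant:" ||
      PySem.Str.startswith st "Bot:" then some st else acc

def pvFinishB : Option String → String
  | none => ""
  | some st => pvExtractA st

theorem pvLoopA_eq_loopAD (ls : List String) : pvLoopA ls = pvLoopAD ls "" := by
  induction ls with
  | nil => rfl
  | cons l rest ih => simp only [pvLoopA, pvLoopAD]; split_ifs <;> simp [ih]

theorem pvLoopAD_append (xs ys : List String) (d : String) :
    pvLoopAD (xs ++ ys) d = pvLoopAD xs (pvLoopAD ys d) := by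
  induction xs with
  | nil => rfl
  | cons l rest ih => simp only [pvLoopAD, List.cons_append]; split_ifs <;> simp [ih]

theorem pvFold_eq_loopAD (ls : List String) (acc : Option String) :
    pvFinishB (List.foldl pvStepB acc ls) = pvLoopAD ls.reverse (pvFinishB acc) := by
  induction ls generalizing acc with
  | nil => rfl
  | cons l rest ih =>
    simp only [List.foldl_cons, List.reverse_cons, pvLoopAD_append, ih]
    congr 1
    simp only [pvLoopAD, pvStepB, pvFinishB]
    split_ifs <;> rfl

theorem pvAltB_eq (last : Option String) :
    (match last with
      | none => ""
      | some st =>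
        match (PySem.Str.splitMax? st ":" 1).getD [] |> (PySem.List.pyGet? · 1) with
        | some p => PySem.Str.slice (PySem.Str.strip p) none (some 100)
        | none => PySem.Str.slice st none (some 100)) = pvFinishB last := by
  cases last <;> rfl

-- ===== VERDICT (by name: the statement is the Claim_ definition above) =====
theorem extract_last_bot_question_py_spec : Claim_equal_extract_last_bot_question_py := by
  intro t _
  unfold Spec_extract_last_bot_question_py extract_last_bot_question_py extract_last_bot_question_py_alt
  simp only [pvAltB_eq]
  have h : ∀ acc, List.foldl (fun acc line =>
      let st := PySem.Str.strip line
      if PySem.Str.startswith st "Jessica:" || PySem.Str.startswith st "Assistant:" ||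
          PySem.Str.startswith st "Bot:" then some st else acc) acc = List.foldl pvStepB acc := by
    intro acc; rfl
  rw [h, pvLoopA_eq_loopAD, pvFold_eq_loopAD]
  rfl
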